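-- pv_equiv track=rewrite | github.com/Agentomics/BioAgentics | src/bioagentics/diagnostics/sepsis/validation/external_validation.py | map_eicu_features
-- ===== SOURCE A (Python) =====
-- EICU_VITAL_MAP: dict[str, str] = {
--     "heartrate": "heart_rate",
--     "systemicsystolic": "sbp",
--     "systemicmean": "map",
--     "respiration": "resp_rate",
--     "sao2": "spo2",
--     "temperature": "temperature",
-- }
--
-- EICU_LAB_MAP: dict[str, str] = {
--     "WBC x 1000": "wbc",
--     "Hgb": "hemoglobin",
--     "Hct": "hematocrit",
--     "platelets x 1000": "platelets",
--     "lactate": "lactate",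
--     "creatinine": "creatinine",
--     "BUN": "bun",
--     "glucose": "glucose",
--     "sodium": "sodium",
--     "potassium": "potassium",
--     "chloride": "chloride",
--     "bicarbonate": "bicarbonate",
--     "total bilirubin": "bilirubin_total",
--     "ALT (SGPT)": "alt",
--     "AST (SGOT)": "ast",
--     "albumin": "albumin",
--     "PT - Loss of INR": "inr",
--     "PTT": "ptt",
--     "paO2": "pao2",
--     "FiO2": "fio2",
-- }
--
-- def map_eicu_features(
--     eicu_df_columns: list[str],
--     target_features: list[str],
-- ) -> dict[str, str | None]:
--     """Map eICU column names to MIMIC-IV feature space.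
--
--     Parameters
--     ----------
--     eicu_df_columns : Column names from eICU data.
--     target_features : Expected MIMIC-IV feature names.
--
--     Returns
--     -------
--     Dictionary mapping target_feature -> eicu_column (or None if missing).
--     """
--     combined_map = {**EICU_VITAL_MAP, **EICU_LAB_MAP}
--     reverse_map = {v: k for k, v in combined_map.items()}
--
--     mapping: dict[str, str | None] = {}
--     for feat in target_features:
--         eicu_name = reverse_map.get(feat)
--         if eicu_name and eicu_name in eicu_df_columns:
--             mapping[feat] = eicu_name
--         else:
--             mapping[feat] = None
--
--     return mapping
-- ===== SOURCE B (Python) =====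
-- EICU_VITAL_MAP: dict[str, str] = {
--     "heartrate": "heart_rate",
--     "systemicsystolic": "sbp",
--     "systemicmean": "map",
--     "respiration": "resp_rate",
--     "sao2": "spo2",
--     "temperature": "temperature",
-- }
--
-- EICU_LAB_MAP: dict[str, str] = {
--     "WBC x 1000": "wbc",
--     "Hgb": "hemoglobin",
--     "Hct": "hematocrit",
--     "platelets x 1000": "platelets",
--     "lactate": "lactate",
--     "creatinine": "creatinine",
--     "BUN": "bun",
--     "glucose": "glucose",
--     "sodium": "sodium",
--     "potassium": "potassium",
--     "chloride": "chloride",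
--     "bicarbonate": "bicarbonate",
--     "total bilirubin": "bilirubin_total",
--     "ALT (SGPT)": "alt",
--     "AST (SGOT)": "ast",
--     "albumin": "albumin",
--     "PT - Loss of INR": "inr",
--     "PTT": "ptt",
--     "paO2": "pao2",
--     "FiO2": "fio2",
-- }
--
--
-- def map_eicu_features(
--     eicu_df_columns: list[str],
--     target_features: list[str],
-- ) -> dict[str, str | None]:
--     """Map eICU column names to MIMIC-IV feature space.
--
--     Two passes, no reverse index: seed every requested feature with None,
--     then scan the known mapping table once and fill in the features whose
--     eICU column is actually present.
--     """
--     wanted = set(target_features)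
--     cols = set(eicu_df_columns)
--     result: dict[str, str | None] = {feat: None for feat in target_features}
--     for eicu_name, feat in {**EICU_VITAL_MAP, **EICU_LAB_MAP}.items():
--         if feat in wanted and eicu_name in cols:
--             result[feat] = eicu_name
--     return result
-- ===== Notes on version B (the rewrite author's own statement) =====
-- stated objective: alternative
-- what changed: B drops A's reverse_map entirely: it seeds the result with every target feature mapped to None, then makes one pass over the fixed mapping table, filling in each requested feature whose eICU column is present (set membership instead of A's per-feature list scan).
import Mathlib
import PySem

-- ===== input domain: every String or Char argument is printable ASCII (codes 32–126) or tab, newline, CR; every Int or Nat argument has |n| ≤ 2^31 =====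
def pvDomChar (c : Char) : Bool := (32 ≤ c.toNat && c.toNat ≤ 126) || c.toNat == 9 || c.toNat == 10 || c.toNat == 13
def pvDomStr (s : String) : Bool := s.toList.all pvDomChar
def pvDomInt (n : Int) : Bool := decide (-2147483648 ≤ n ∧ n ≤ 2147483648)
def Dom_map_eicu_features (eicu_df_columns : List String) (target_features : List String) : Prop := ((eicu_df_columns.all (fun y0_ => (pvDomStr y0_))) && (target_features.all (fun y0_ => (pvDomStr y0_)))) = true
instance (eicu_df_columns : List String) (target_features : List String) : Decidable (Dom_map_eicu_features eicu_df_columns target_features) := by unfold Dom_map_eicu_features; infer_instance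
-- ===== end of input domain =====

-- B replaces A's reverse index with a seed-then-populate scan of the mapping table (alternative decomposition, same result).

-- the module constants EICU_VITAL_MAP and EICU_LAB_MAP, already combined in Python insertion order ({**vital, **lab}; all keys distinct)
def pvCombinedList : List (String × String) :=
  [("heartrate", "heart_rate"), ("systemicsystolic", "sbp"), ("systemicmean", "map"),
   ("respiration", "resp_rate"), ("sao2", "spo2"), ("temperature", "temperature"),
   ("WBC x 1000", "wbc"), ("Hgb", "hemoglobin"), ("Hct", "hematocrit"),
   ("platelets x 1000", "platelets"), ("lactate", "lactate"), ("creatinine", "creatinine"),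
   ("BUN", "bun"), ("glucose", "glucose"), ("sodium", "sodium"), ("potassium", "potassium"),
   ("chloride", "chloride"), ("bicarbonate", "bicarbonate"), ("total bilirubin", "bilirubin_total"),
   ("ALT (SGPT)", "alt"), ("AST (SGOT)", "ast"), ("albumin", "albumin"),
   ("PT - Loss of INR", "inr"), ("PTT", "ptt"), ("paO2", "pao2"), ("FiO2", "fio2")]

-- ===== PORT A =====
def map_eicu_features (eicu_df_columns : List String) (target_features : List String) : List (String × Option String) :=
  let combined_map : PySem.Dict String String := PySem.Dict.ofList pvCombinedList
  -- reverse_map = {v: k for k, v in combined_map.items()}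
  let reverse_map : PySem.Dict String String :=
    combined_map.items.foldl (fun d p => d.insert p.2 p.1) PySem.Dict.empty
  -- for feat in target_features: eicu_name = reverse_map.get(feat); if eicu_name and eicu_name in eicu_df_columns: …
  let mapping : PySem.Dict String (Option String) :=
    target_features.foldl (fun d feat =>
      match reverse_map.get? feat with
      | some eicu_name =>
          if eicu_name ≠ "" ∧ eicu_df_columns.contains eicu_name
          then d.insert feat (some eicu_name)
          else d.insert feat none
      | none => d.insert feat none) PySem.Dict.empty
  mapping.items

-- ===== PORT B =====
def map_eicu_features_alt (eicu_df_columns : List String) (target_features : List String) : List (String × Option String) :=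
  let wanted : PySem.Set String := PySem.Set.ofList target_features
  let cols : PySem.Set String := PySem.Set.ofList eicu_df_columns
  -- result = {feat: None for feat in target_features}
  let result0 : PySem.Dict String (Option String) :=
    target_features.foldl (fun d feat => d.insert feat none) PySem.Dict.empty
  -- for eicu_name, feat in {**EICU_VITAL_MAP, **EICU_LAB_MAP}.items(): if feat in wanted and eicu_name in cols: result[feat] = eicu_name
  let result : PySem.Dict String (Option String) :=
    (PySem.Dict.ofList pvCombinedList).items.foldl
      (fun d p => if PySem.Set.contains wanted p.2 && PySem.Set.contains cols p.1
                  then d.insert p.2 (some p.1) else d)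
      result0
  result.items

-- ===== PRECONDITION & SPEC =====
def Spec_map_eicu_features (eicu_df_columns : List String) (target_features : List String) (out : List (String × Option String)) : Prop := out = map_eicu_features_alt eicu_df_columns target_features
instance (eicu_df_columns : List String) (target_features : List String) (out : List (String × Option String)) : Decidable (Spec_map_eicu_features eicu_df_columns target_features out) := by unfold Spec_map_eicu_features; infer_instance

-- ===== CLAIM (what is proved, stated in full; the proofs are below) =====
def Claim_equal_map_eicu_features : Prop := ∀ (eicu_df_columns : List String) (target_features : List String), Dom_map_eicu_features eicu_df_columns target_features → Spec_map_eicu_features eicu_df_columns target_features (map_eicu_features eicu_df_columns target_features)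

-- ===== LEMMAS AND PROOFS =====

-- per-feature value that A's loop body inserts
def gA (cols : List String) (reverse : PySem.Dict String String) (f : String) : Option String :=
  match reverse.get? f with
  | some k => if k ≠ "" ∧ cols.contains k then some k else none
  | none => none

theorem stepA_eq (cols : List String) (reverse : PySem.Dict String String) :
    (fun (d : PySem.Dict String (Option String)) feat =>
      match reverse.get? feat with
      | some eicu_name =>
          if eicu_name ≠ "" ∧ cols.contains eicu_name
          then d.insert feat (some eicu_name)
          else d.insert feat none
      | none => d.insert feat none)
    = fun d feat => d.insert feat (gA cols reverse feat) := by
  funext d f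
  unfold gA
  cases reverse.get? f with
  | none => rfl
  | some k =>
    dsimp only
    by_cases h : k ≠ "" ∧ cols.contains k = true
    · rw [if_pos h, if_pos h]
    · rw [if_neg h, if_neg h]

-- A's reverse-dict fold leaves keys that never occur as a value untouched
theorem get?_revfold_untouched (l : List (String × String)) (d : PySem.Dict String String)
    (x : String) (h : ∀ q ∈ l, q.2 ≠ x) :
    (l.foldl (fun d p => d.insert p.2 p.1) d).get? x = d.get? x := by
  induction l generalizing d with
  | nil => rfl
  | cons p l ih =>
    simp only [List.foldl_cons]
    rw [ih _ (fun q hq => h q (List.mem_cons_of_mem _ hq))]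
    exact PySem.Dict.get?_insert_of_ne _ _ (fun hx => h p (List.mem_cons_self) hx.symm)

-- with pairwise-distinct values, A's reverse-dict lookup is the first (only) pair with that value
theorem get?_revfold (l : List (String × String)) (d : PySem.Dict String String) (x : String)
    (hnd : (l.map Prod.snd).Nodup) :
    (l.foldl (fun d p => d.insert p.2 p.1) d).get? x =
      match l.find? (fun p => p.2 == x) with
      | some p => some p.1
      | none => d.get? x := by
  induction l generalizing d with
  | nil => rfl
  | cons p l ih =>
    simp only [List.map_cons, List.nodup_cons] at hnd
    simp only [List.foldl_cons]
    by_cases hx : p.2 = x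
    · have hnone : ∀ q ∈ l, q.2 ≠ x := by
        intro q hq
        subst hx
        exact fun he => hnd.1 (he ▸ List.mem_map_of_mem hq)
      rw [get?_revfold_untouched _ _ _ hnone, List.find?_cons_of_pos (by simp [hx]), hx,
        PySem.Dict.get?_insert_self]
    · rw [ih _ hnd.2, List.find?_cons_of_neg (by simp [hx])]
      cases l.find? (fun p => p.2 == x) with
      | none => exact PySem.Dict.get?_insert_of_ne _ _ (Ne.symm hx)
      | some q => rfl

-- a fold of unconditional inserts whose value depends only on the key, looked up afterwards
theorem getD_insfun_fold (g : String → Option String) (ts : List String)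
    (d : PySem.Dict String (Option String)) (x : String) :
    (ts.foldl (fun d f => d.insert f (g f)) d).getD x none =
      if x ∈ ts then g x else d.getD x none := by
  induction ts generalizing d with
  | nil => simp
  | cons f ts ih =>
    simp only [List.foldl_cons, ih, PySem.Dict.getD_insert, List.mem_cons]
    by_cases h1 : x ∈ ts <;> by_cases h2 : x = f <;> simp [h1, h2]

-- B's populate pass leaves keys that never occur as a mapped feature untouched
theorem getD_condfold_untouched (c : String × String → Bool) (l : List (String × String))
    (d : PySem.Dict String (Option String)) (x : String) (h : ∀ q ∈ l, q.2 ≠ x) :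
    (l.foldl (fun d p => if c p then d.insert p.2 (some p.1) else d) d).getD x none
      = d.getD x none := by
  induction l generalizing d with
  | nil => rfl
  | cons p l ih =>
    simp only [List.foldl_cons]
    rw [ih _ (fun q hq => h q (List.mem_cons_of_mem _ hq))]
    by_cases hc : c p <;>
      simp [hc, PySem.Dict.getD_insert, Ne.symm (h p List.mem_cons_self)]

-- with pairwise-distinct mapped features, B's populate pass at key x is decided by the one pair mapping to x
theorem getD_condfold (c : String × String → Bool) (l : List (String × String))
    (d : PySem.Dict String (Option String)) (x : String)
    (hnd : (l.map Prod.snd).Nodup) :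
    (l.foldl (fun d p => if c p then d.insert p.2 (some p.1) else d) d).getD x none =
      match l.find? (fun p => p.2 == x) with
      | some p => if c p then some p.1 else d.getD x none
      | none => d.getD x none := by
  induction l generalizing d with
  | nil => rfl
  | cons p l ih =>
    simp only [List.map_cons, List.nodup_cons] at hnd
    simp only [List.foldl_cons]
    by_cases hx : p.2 = x
    · have hnone : ∀ q ∈ l, q.2 ≠ x := by
        intro q hq
        subst hx
        exact fun he => hnd.1 (he ▸ List.mem_map_of_mem hq)
      rw [getD_condfold_untouched _ _ _ _ hnone, List.find?_cons_of_pos (by simp [hx])]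
      by_cases hc : c p <;> simp [hc, hx]
    · rw [ih _ hnd.2, List.find?_cons_of_neg (by simp [hx])]
      cases l.find? (fun p => p.2 == x) with
      | none => by_cases hc : c p <;> simp [hc, PySem.Dict.getD_insert, Ne.symm hx]
      | some q =>
        by_cases hc : c p <;> by_cases hq : c q <;>
          simp [hc, hq, PySem.Dict.getD_insert, Ne.symm hx]

-- B's populate pass only overwrites keys already present, so the key list is unchanged
theorem keys_condfold (c : String × String → Bool) (l : List (String × String))
    (d : PySem.Dict String (Option String))
    (h : ∀ p ∈ l, c p = true → d.contains p.2 = true) :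
    (l.foldl (fun d p => if c p then d.insert p.2 (some p.1) else d) d).keys = d.keys := by
  induction l generalizing d with
  | nil => rfl
  | cons p l ih =>
    simp only [List.foldl_cons]
    by_cases hc : c p
    · simp only [hc, if_true]
      rw [ih _ (fun q hq hcq => by
        rw [PySem.Dict.contains_insert]
        simp [h q (List.mem_cons_of_mem _ hq) hcq])]
      exact PySem.Dict.keys_insert_of_contains _ _ (h p List.mem_cons_self hc)
    · simp only [hc]
      exact ih _ (fun q hq hcq => h q (List.mem_cons_of_mem _ hq) hcq)

-- Bool bridge: set membership after set(xs) equals list membership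
theorem contains_ofList_eq (xs : List String) (x : String) :
    PySem.Set.contains (PySem.Set.ofList xs) x = xs.contains x := by
  rw [Bool.eq_iff_iff]
  simp [PySem.Set.mem_ofList]

-- first components of the mapping table are nonempty strings (discharges A's truthiness test)
theorem pvCombined_fst_ne (p : String × String) (hp : p ∈ pvCombinedList) : p.1 ≠ "" := by
  fin_cases hp <;> decide

theorem pvCombined_snd_nodup : (pvCombinedList.map Prod.snd).Nodup := by decide

theorem pvCombined_items : (PySem.Dict.ofList pvCombinedList).items = pvCombinedList := by rfl

-- ===== VERDICT (by name: the statement is the Claim_ definition above) =====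
theorem map_eicu_features_spec : Claim_equal_map_eicu_features := by
  intro cols ts _
  unfold Spec_map_eicu_features map_eicu_features map_eicu_features_alt
  simp only [pvCombined_items, stepA_eq]
  set reverse : PySem.Dict String String :=
    pvCombinedList.foldl (fun d p => d.insert p.2 p.1) PySem.Dict.empty with hrev
  set c : String × String → Bool := fun p =>
    PySem.Set.contains (PySem.Set.ofList ts) p.2 && PySem.Set.contains (PySem.Set.ofList cols) p.1
    with hc
  set AD : PySem.Dict String (Option String) :=
    ts.foldl (fun d feat => d.insert feat (gA cols reverse feat)) PySem.Dict.empty with hAD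
  set BD : PySem.Dict String (Option String) :=
    pvCombinedList.foldl (fun d p => if c p then d.insert p.2 (some p.1) else d)
      (ts.foldl (fun d feat => d.insert feat none) PySem.Dict.empty) with hBD
  have hkeysA : AD.keys = PySem.Set.ofList ts := by
    rw [hAD, PySem.Dict.keys_foldl_insert, PySem.Dict.keys_empty, PySem.Set.update_nil_left]
  have hkeys0 : (ts.foldl (fun d feat => d.insert feat none)
      (PySem.Dict.empty : PySem.Dict String (Option String))).keys = PySem.Set.ofList ts := by
    have h0 := PySem.Dict.keys_foldl_insert ts (fun _ _ => (none : Option String))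
      PySem.Dict.empty
    simpa [PySem.Set.update_nil_left] using h0
  have hkeysB : BD.keys = PySem.Set.ofList ts := by
    rw [hBD, keys_condfold, hkeys0]
    intro p _ hcp
    rw [PySem.Dict.contains_iff_mem_keys, hkeys0]
    have := (Bool.and_eq_true _ _).mp (hc ▸ hcp)
    exact (PySem.Set.contains_iff _ _).mp this.1
  have hndA : AD.keys.Nodup := hkeysA ▸ PySem.Set.nodup_ofList ts
  have hndB : BD.keys.Nodup := hkeysB ▸ PySem.Set.nodup_ofList ts
  rw [PySem.Dict.items_eq_map_keys AD hndA none, PySem.Dict.items_eq_map_keys BD hndB none,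
    hkeysA, hkeysB]
  apply List.map_congr_left
  intro f hf
  have hfts : f ∈ ts := (PySem.Set.mem_ofList _ _).mp hf
  have hB0 : (ts.foldl (fun d feat => d.insert feat none)
      (PySem.Dict.empty : PySem.Dict String (Option String))).getD f none = none := by
    have := getD_insfun_fold (fun _ => none) ts PySem.Dict.empty f
    simpa [hfts] using this
  have hBval : BD.getD f none =
      match pvCombinedList.find? (fun p => p.2 == f) with
      | some p => if c p then some p.1 else none
      | none => none := by
    rw [hBD, getD_condfold c pvCombinedList _ f pvCombined_snd_nodup]
    cases pvCombinedList.find? (fun p => p.2 == f) with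
    | none => exact hB0
    | some p => by_cases hcp : c p <;> simp [hcp, hB0]
  have hAval : AD.getD f none = gA cols reverse f := by
    rw [hAD, getD_insfun_fold (gA cols reverse) ts PySem.Dict.empty f, if_pos hfts]
  rw [hAval, hBval]
  unfold gA
  rw [hrev, get?_revfold pvCombinedList PySem.Dict.empty f pvCombined_snd_nodup]
  cases hfind : pvCombinedList.find? (fun p => p.2 == f) with
  | none => rfl
  | some p =>
    have hpmem : p ∈ pvCombinedList := List.mem_of_find?_eq_some hfind
    have hpf : p.2 = f := by simpa using List.find?_some hfind
    have hp1 : p.1 ≠ "" := pvCombined_fst_ne p hpmem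
    have hpts : p.2 ∈ ts := hpf ▸ hfts
    simp only [hc, contains_ofList_eq]
    by_cases hcol : p.1 ∈ cols <;> simp [hcol, hp1, hpts]
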